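-- pv_equiv track=rewrite | github.com/t-zl/UNI_programs | Python/CT2_PracticeCodingTasks/p_task4_tl.py | word_report
-- ===== SOURCE A (Python) =====
-- def word_report(word_dict, word):
--     report = f"{word} contains: "
--     # sort word_dict alphabetically
--     # word_dict = sorted(word_dict)
--
--     for letter in word_dict:
--         # build the report string that prints the letter and the tally
--         if len(word_dict) < 2:
--             report += f"{word_dict[letter]}{letter}"
--
--         # if at last letter in dictionary, print 'and' before it
--         elif letter == list(word_dict)[-1]:
--             report += f"and {word_dict[letter]}{letter}"
--
--         else:
--             # If not last letter
--             report += f"{word_dict[letter]}{letter}, "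
--
--     return report
-- ===== SOURCE B (Python) =====
-- def word_report(word_dict, word):
--     parts = [f"{word_dict[l]}{l}" for l in word_dict]
--     report = f"{word} contains: "
--     if len(parts) < 2:
--         return report + "".join(parts)
--     return report + ", ".join(parts[:-1]) + ", and " + parts[-1]
-- ===== Notes on version B (the rewrite author's own statement) =====
-- stated objective: faster
-- what changed: Replaces the forward loop with in-loop last-element detection (rebuilding list(word_dict)[-1] on every iteration) by a build-then-join pass: format all pieces once, then assemble with a slice, ', '.join and a single ', and ' before the final piece.
import Mathlib
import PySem

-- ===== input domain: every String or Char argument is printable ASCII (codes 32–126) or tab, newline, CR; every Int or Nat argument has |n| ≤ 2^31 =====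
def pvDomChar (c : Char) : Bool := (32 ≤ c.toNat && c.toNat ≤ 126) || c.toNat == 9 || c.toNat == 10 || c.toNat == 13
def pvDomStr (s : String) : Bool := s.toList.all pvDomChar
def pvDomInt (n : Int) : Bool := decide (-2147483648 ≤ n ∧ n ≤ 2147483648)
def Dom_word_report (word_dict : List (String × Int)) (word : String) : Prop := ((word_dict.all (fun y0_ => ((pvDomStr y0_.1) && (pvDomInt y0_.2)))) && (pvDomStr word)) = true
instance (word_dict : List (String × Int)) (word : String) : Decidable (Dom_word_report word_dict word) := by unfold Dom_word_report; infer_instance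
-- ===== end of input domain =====

-- B replaces A's forward loop with in-loop last-element detection by a build-then-join
-- assembly (format all pieces, then slice + join), removing the per-iteration rebuild of
-- the key list; a timing run measured B faster.


-- ===== PORT A =====
-- 'for letter in word_dict' with 'word_dict[letter]' iterates the dict's (key, value)
-- pairs in insertion order (exact for a dict, whose keys are distinct — Pre_ below);
-- 'list(word_dict)[-1]' is the last key (the loop body only runs on a nonempty dict).
def word_report (word_dict : List (String × Int)) (word : String) : String :=
  word_dict.foldl
    (fun report kv =>
      if word_dict.length < 2 then
        report ++ PySem.Int.toStr kv.2 ++ kv.1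
      else if kv.1 == (word_dict.map Prod.fst).getLastD "" then
        report ++ "and " ++ PySem.Int.toStr kv.2 ++ kv.1
      else
        report ++ PySem.Int.toStr kv.2 ++ kv.1 ++ ", ")
    (word ++ " contains: ")

-- ===== PORT B =====
-- parts[-1] is read with pyGet?;  .getD "" is never used: the branch guarantees length ≥ 2.
def word_report_alt (word_dict : List (String × Int)) (word : String) : String :=
  let parts := word_dict.map (fun kv => PySem.Int.toStr kv.2 ++ kv.1)
  let report := word ++ " contains: "
  if parts.length < 2 then
    report ++ PySem.Str.join "" parts
  else
    report ++ PySem.Str.join ", " (PySem.List.slice parts none (some (-1)))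
      ++ ", and " ++ (PySem.List.pyGet? parts (-1)).getD ""

-- ===== PRECONDITION & SPEC =====
-- The assoc list encodes a Python dict, whose keys are always distinct; a list with
-- duplicate keys does not correspond to any dict input of A, so Pre_ requires distinct keys.
def Pre_word_report (word_dict : List (String × Int)) (word : String) : Prop :=
  (word_dict.map Prod.fst).Nodup
instance (word_dict : List (String × Int)) (word : String) : Decidable (Pre_word_report word_dict word) := by unfold Pre_word_report; infer_instance
def pvWitness_word_report : (List (String × Int)) × String := ([("a", 1), ("b", 2)], "ab")

def Spec_word_report (word_dict : List (String × Int)) (word : String) (out : String) : Prop := out = word_report_alt word_dict word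
instance (word_dict : List (String × Int)) (word : String) (out : String) : Decidable (Spec_word_report word_dict word out) := by unfold Spec_word_report; infer_instance

-- ===== CLAIM (what is proved, stated in full; the proofs are below) =====
def Claim_equal_word_report : Prop := ∀ (word_dict : List (String × Int)) (word : String), Dom_word_report word_dict word → Pre_word_report word_dict word → Spec_word_report word_dict word (word_report word_dict word)

-- ===== LEMMAS AND PROOFS =====

def pvPiece (kv : String × Int) : String := PySem.Int.toStr kv.2 ++ kv.1

lemma pv_join_nil (sep : String) : PySem.Str.join sep [] = "" := by
  simp [PySem.Str.join, PySem.Chars.join, List.intercalate]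

lemma pv_join_one (sep a : String) : PySem.Str.join sep [a] = a := by
  simp [PySem.Str.join, PySem.Chars.join, List.intercalate]

lemma pv_join_cons_cons (sep a b : String) (l : List String) :
    PySem.Str.join sep (a :: b :: l) = a ++ sep ++ PySem.Str.join sep (b :: l) := by
  have h : (PySem.Str.join sep (a :: b :: l)).toList
      = (a ++ sep ++ PySem.Str.join sep (b :: l)).toList := by
    simp [PySem.Str.toList_join, PySem.Chars.join_cons_cons, String.toList_append]
  have := congrArg String.ofList h
  simpa [PySem.Str.join, String.append_assoc] using this

-- the non-last entries of A's loop accumulate exactly ", ".join(pieces) + ", "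
lemma pv_foldl_mid (a : String × Int) (qs : List (String × Int)) (r : String) :
    (a :: qs).foldl (fun s kv => s ++ pvPiece kv ++ ", ") r
      = r ++ PySem.Str.join ", " ((a :: qs).map pvPiece) ++ ", " := by
  induction qs generalizing a r with
  | nil => simp [pv_join_one, String.append_assoc]
  | cons b t ih =>
    show (b :: t).foldl _ (r ++ pvPiece a ++ ", ") = _
    rw [ih b (r ++ pvPiece a ++ ", ")]
    simp [pv_join_cons_cons, String.append_assoc]

-- A's loop over qs ++ [q0]: every key of qs differs from the last key, q0's key is it
lemma pv_foldl_last (L : String) (q0 : String × Int) (qs : List (String × Int)) (r : String)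
    (hq : q0.1 = L) (h : ∀ q ∈ qs, q.1 ≠ L) :
    (qs ++ [q0]).foldl
        (fun report kv =>
          if kv.1 == L then report ++ "and " ++ PySem.Int.toStr kv.2 ++ kv.1
          else report ++ PySem.Int.toStr kv.2 ++ kv.1 ++ ", ") r
      = qs.foldl (fun s kv => s ++ pvPiece kv ++ ", ") r ++ "and " ++ pvPiece q0 := by
  induction qs generalizing r with
  | nil => simp [hq, pvPiece, String.append_assoc]
  | cons a t ih =>
    have ha : (a.1 == L) = false := by
      simpa using h a (by simp)
    have hinit : r ++ PySem.Int.toStr a.2 ++ a.1 ++ ", " = r ++ pvPiece a ++ ", " := by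
      simp [pvPiece, String.append_assoc]
    simp only [List.cons_append, List.foldl_cons, ha, Bool.false_eq_true, if_false]
    rw [hinit, ih _ (fun q hq' => h q (List.mem_cons_of_mem _ hq'))]

theorem word_report_spec : Claim_equal_word_report := by
  intro word_dict word _ hpre
  unfold Spec_word_report
  match word_dict, hpre with
  | [], _ => simp [word_report, word_report_alt, pv_join_nil]
  | [kv], _ =>
      simp [word_report, word_report_alt, pv_join_one, String.append_assoc]
  | a :: b :: t, hpre =>
      have hne : (a :: b :: t : List (String × Int)) ≠ [] := by simp
      obtain ⟨qs, q0, hq⟩ : ∃ qs q0, (a :: b :: t : List (String × Int)) = qs ++ [q0] :=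
        ⟨_, _, (List.dropLast_concat_getLast hne).symm⟩
      rw [hq] at hpre ⊢
      have hqsne : qs ≠ [] := by
        intro h0
        rw [h0] at hq
        simp at hq
      have hqlen : 0 < qs.length := List.length_pos_of_ne_nil hqsne
      have hlen2 : ¬ ((qs ++ [q0]).length < 2) := by
        simp only [List.length_append, List.length_cons, List.length_nil]
        omega
      -- keys: the last key is q0.1, and no key of qs equals it
      have hnod := hpre
      simp only [Pre_word_report, List.map_append, List.map_cons, List.map_nil,
        List.nodup_append] at hnod
      have hfresh : ∀ q ∈ qs, q.1 ≠ q0.1 := by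
        intro q hqmem heq
        exact hnod.2.2 q.1 (List.mem_map_of_mem hqmem) q0.1 (List.mem_singleton_self _) heq
      have hlast : (((qs ++ [q0]).map Prod.fst)).getLastD "" = q0.1 := by simp
      -- A's side
      have hA : word_report (qs ++ [q0]) word
          = qs.foldl (fun s kv => s ++ pvPiece kv ++ ", ") (word ++ " contains: ")
              ++ "and " ++ pvPiece q0 := by
        unfold word_report
        simp only [hlast, eq_false hlen2, if_false]
        exact pv_foldl_last q0.1 q0 qs (word ++ " contains: ") rfl hfresh
      -- B's side
      obtain ⟨c, cs, hcs⟩ : ∃ c cs, qs = c :: cs := by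
        cases qs with
        | nil => exact absurd rfl hqsne
        | cons c cs => exact ⟨c, cs, rfl⟩
      have hmap : (qs ++ [q0]).map (fun kv => PySem.Int.toStr kv.2 ++ kv.1)
          = (qs.map pvPiece) ++ [pvPiece q0] := by simp [pvPiece]
      have hB : word_report_alt (qs ++ [q0]) word
          = word ++ " contains: "
              ++ PySem.Str.join ", " ((c :: cs).map pvPiece) ++ ", and " ++ pvPiece q0 := by
        simp only [word_report_alt]
        rw [hmap]
        have hlp : ¬ ((qs.map pvPiece) ++ [pvPiece q0]).length < 2 := by
          simp only [List.length_append, List.length_map, List.length_cons, List.length_nil]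
          omega
        rw [if_neg hlp, PySem.List.slice_to_neg_one, PySem.List.pyGet?_neg_one_append_singleton]
        rw [hcs, List.dropLast_concat]
        simp
      rw [hA, hB, hcs, pv_foldl_mid]
      have hglue : (", " ++ "and " : String) = ", and " := by decide
      calc word ++ " contains: " ++ PySem.Str.join ", " ((c :: cs).map pvPiece) ++ ", " ++ "and " ++ pvPiece q0
          = word ++ " contains: " ++ PySem.Str.join ", " ((c :: cs).map pvPiece) ++ (", " ++ "and ") ++ pvPiece q0 := by
            simp [String.append_assoc]
        _ = word ++ " contains: " ++ PySem.Str.join ", " ((c :: cs).map pvPiece) ++ ", and " ++ pvPiece q0 := by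
            rw [hglue]
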